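-- pv_equiv track=rewrite | github.com/pagel-s/MIDAS | generate_text_descriptions.py | describe_pharmacophores
-- ===== SOURCE A (Python) =====
-- from typing import Optional, List, Tuple, Dict
--
-- def describe_pharmacophores(counts: Dict[str, int]) -> str:
--     if not counts:
--         return "Pharmacophore features: none identified."
--     # Order common families for readability if present
--     order = [
--         'Donor', 'Acceptor', 'Aromatic', 'Hydrophobe',
--         'PosIonizable', 'NegIonizable', 'LumpedHydrophobe', 'ZnBinder'
--     ]
--     parts = []
--     for fam in order:
--         if fam in counts and counts[fam] > 0:
--             parts.append(f"{fam.lower()}:{counts[fam]}")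
--     # Add any remaining families
--     for fam, val in counts.items():
--         if fam not in order and val > 0:
--             parts.append(f"{fam.lower()}:{val}")
--     return "Pharmacophores: " + (", ".join(parts) if parts else "none identified.")
-- ===== SOURCE B (Python) =====
-- def describe_pharmacophores(counts):
--     if not counts:
--         return "Pharmacophore features: none identified."
--     order = [
--         'Donor', 'Acceptor', 'Aromatic', 'Hydrophobe',
--         'PosIonizable', 'NegIonizable', 'LumpedHydrophobe', 'ZnBinder'
--     ]
--     rank = {fam: i for i, fam in enumerate(order)}
--     slots = [None] * len(order)
--     extras = []
--     for fam, val in counts.items():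
--         if val > 0:
--             part = f"{fam.lower()}:{val}"
--             i = rank.get(fam)
--             if i is None:
--                 extras.append(part)
--             else:
--                 slots[i] = part
--     parts = [p for p in slots if p is not None] + extras
--     return "Pharmacophores: " + (", ".join(parts) if parts else "none identified.")
-- ===== Notes on version B (the rewrite author's own statement) =====
-- stated objective: alternative
-- what changed: B makes a single pass over the dict, bucketing each positive family into a rank-indexed slot array (unknown families into an extras list) and then concatenating, instead of A's scan over the order list with membership/lookup into counts followed by a second pass over the dict. Pre_ excludes association lists with duplicate keys, which do not correspond to any Python dict (a duplicate-key literal collapses to its last value before A ever runs).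
import Mathlib
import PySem

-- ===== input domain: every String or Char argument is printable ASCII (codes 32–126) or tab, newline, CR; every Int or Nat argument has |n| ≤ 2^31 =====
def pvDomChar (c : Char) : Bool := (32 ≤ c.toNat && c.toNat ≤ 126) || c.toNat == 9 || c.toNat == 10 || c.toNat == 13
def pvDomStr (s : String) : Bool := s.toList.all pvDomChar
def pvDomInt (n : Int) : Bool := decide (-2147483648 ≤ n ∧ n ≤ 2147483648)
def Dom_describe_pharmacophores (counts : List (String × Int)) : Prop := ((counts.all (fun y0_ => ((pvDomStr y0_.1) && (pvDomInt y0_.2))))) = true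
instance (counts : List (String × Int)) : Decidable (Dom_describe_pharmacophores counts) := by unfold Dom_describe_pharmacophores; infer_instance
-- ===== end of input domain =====

-- B buckets each positive family into a rank-indexed slot array in a single pass over the items
-- (unknown families into an extras list), instead of A's scan over the order list with dict
-- lookups followed by a second pass over the items: an alternative decomposition, same cost class.


-- ===== PORT A =====
-- the `order` list literal shared by both Python versions
def pvOrder : List String :=
  ["Donor", "Acceptor", "Aromatic", "Hydrophobe",
   "PosIonizable", "NegIonizable", "LumpedHydrophobe", "ZnBinder"]

-- the f-string f"{fam.lower()}:{val}" (identical in A and B)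
def pvPart (fam : String) (val : Int) : String :=
  PySem.Str.lower fam ++ ":" ++ PySem.Int.toStr val

def describe_pharmacophores (counts : List (String × Int)) : String :=
  if counts.isEmpty then "Pharmacophore features: none identified."
  else
    let d := PySem.Dict.mk counts      -- the dict argument (keys unique under Pre_)
    -- for fam in order: if fam in counts and counts[fam] > 0: parts.append(...)
    let parts := pvOrder.foldl (fun ps fam =>
      if d.contains fam then
        match d.get? fam with
        | some v => if 0 < v then ps ++ [pvPart fam v] else ps
        | none => ps                    -- unreachable: contains = isSome get?
      else ps) []
    -- for fam, val in counts.items(): if fam not in order and val > 0: parts.append(...)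
    let parts := counts.foldl (fun ps fv =>
      if !pvOrder.contains fv.1 && 0 < fv.2 then ps ++ [pvPart fv.1 fv.2] else ps) parts
    "Pharmacophores: " ++ (if !parts.isEmpty then PySem.Str.join ", " parts else "none identified.")

-- ===== PORT B =====
-- rank = {fam: i for i, fam in enumerate(order)}
def pvRank : PySem.Dict String Int :=
  (PySem.List.enumerate pvOrder).foldl (fun d p => d.insert p.2 p.1) PySem.Dict.empty

-- the loop body: bucket a positive item into its slot (indices are 0..7, so .toNat is exact)
def pvStepB (st : List (Option String) × List String) (fv : String × Int) :
    List (Option String) × List String :=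
  if 0 < fv.2 then
    match pvRank.get? fv.1 with
    | some i => (st.1.set i.toNat (some (pvPart fv.1 fv.2)), st.2)
    | none => (st.1, st.2 ++ [pvPart fv.1 fv.2])
  else st

def describe_pharmacophores_alt (counts : List (String × Int)) : String :=
  if counts.isEmpty then "Pharmacophore features: none identified."
  else
    let st := counts.foldl pvStepB (List.replicate 8 none, [])
    let parts := st.1.filterMap id ++ st.2
    "Pharmacophores: " ++ (if !parts.isEmpty then PySem.Str.join ", " parts else "none identified.")

-- ===== PRECONDITION & SPEC =====
-- Pre_ excludes association lists with duplicate keys: they do not correspond to any Python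
-- dict (a duplicate-key literal collapses to its last value before A ever runs).
def Pre_describe_pharmacophores (counts : List (String × Int)) : Prop :=
  (counts.map Prod.fst).Nodup

instance (counts : List (String × Int)) : Decidable (Pre_describe_pharmacophores counts) := by
  unfold Pre_describe_pharmacophores; infer_instance

def pvWitness_describe_pharmacophores : (List (String × Int)) :=
  [("Donor", 2), ("Foo", 1), ("Bar", 0)]

def Spec_describe_pharmacophores (counts : List (String × Int)) (out : String) : Prop :=
  out = describe_pharmacophores_alt counts

instance (counts : List (String × Int)) (out : String) :
    Decidable (Spec_describe_pharmacophores counts out) := by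
  unfold Spec_describe_pharmacophores; infer_instance

-- ===== CLAIM (what is proved, stated in full; the proofs are below) =====
def Claim_equal_describe_pharmacophores : Prop :=
  ∀ (counts : List (String × Int)), Dom_describe_pharmacophores counts →
    Pre_describe_pharmacophores counts →
    Spec_describe_pharmacophores counts (describe_pharmacophores counts)


-- ===== LEMMAS AND PROOFS =====

-- expected value of one slot after B's loop, as a function of a first-match lookup
def pvSlotFun (cs : List (String × Int)) (fam : String) (o : Option String) : Option String :=
  match cs.lookup fam with
  | some v => if 0 < v then some (pvPart fam v) else o
  | none => o

def pvES (cs : List (String × Int)) (s : List (Option String)) : List (Option String) :=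
  List.zipWith (pvSlotFun cs) pvOrder s

def pvEX (cs : List (String × Int)) : List String :=
  (cs.filter (fun fv => decide (0 < fv.2) && (pvRank.get? fv.1).isNone)).map
    (fun fv => pvPart fv.1 fv.2)

lemma pvRank_get_some {k : String} {j : Int} (h : pvRank.get? k = some j) :
    ∃ n : Nat, j = (n : Int) ∧ pvOrder[n]? = some k := by
  revert h
  simp only [pvRank, pvOrder, PySem.List.enumerate, List.foldl]
  simp only [PySem.Dict.get?_insert]
  intro h
  split_ifs at h <;> simp_all <;>
    first
      | exact ⟨0, by omega, rfl⟩
      | exact ⟨1, by omega, rfl⟩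
      | exact ⟨2, by omega, rfl⟩
      | exact ⟨3, by omega, rfl⟩
      | exact ⟨4, by omega, rfl⟩
      | exact ⟨5, by omega, rfl⟩
      | exact ⟨6, by omega, rfl⟩
      | exact ⟨7, by omega, rfl⟩

lemma pvRank_get_none {k : String} (h : pvRank.get? k = none) : k ∉ pvOrder := by
  revert h
  simp only [pvRank, pvOrder, PySem.List.enumerate, List.foldl]
  simp only [PySem.Dict.get?_insert]
  intro h
  split_ifs at h <;> simp_all

lemma pvOrder_nodup : pvOrder.Nodup := by decide

lemma pvLookup_none (cs : List (String × Int)) (k : String)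
    (h : k ∉ cs.map Prod.fst) : cs.lookup k = none := by
  induction cs with
  | nil => rfl
  | cons p cs ih =>
    simp only [List.map_cons, List.mem_cons] at h
    push_neg at h
    have h1 : (k == p.1) = false := by simpa using h.1
    simp [List.lookup, h1, ih h.2]

-- the main loop invariant of B
lemma pvLoopB (cs : List (String × Int)) (hnd : (cs.map Prod.fst).Nodup) :
    ∀ (s : List (Option String)) (e : List String), s.length = 8 →
      cs.foldl pvStepB (s, e) = (pvES cs s, e ++ pvEX cs) := by
  induction cs with
  | nil =>
    intro s e hs
    have : pvES [] s = s := by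
      apply List.ext_getElem
      · simp [pvES, hs]; rfl
      · intro i h1 h2
        simp [pvES, pvSlotFun, List.getElem_zipWith, List.lookup]
    simp [this, pvEX]
  | cons p cs ih =>
    intro s e hs
    rw [List.map_cons, List.nodup_cons] at hnd
    obtain ⟨hk, hnd⟩ := hnd
    have hlk : cs.lookup p.1 = none := pvLookup_none cs p.1 hk
    rw [List.foldl_cons]
    by_cases hv : 0 < p.2
    · cases hr : pvRank.get? p.1 with
      | none =>
        have hstep : pvStepB (s, e) p = (s, e ++ [pvPart p.1 p.2]) := by
          simp [pvStepB, hv, hr]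
        have hmem : p.1 ∉ pvOrder := pvRank_get_none hr
        rw [hstep, ih hnd s _ hs]
        have hES : pvES (p :: cs) s = pvES cs s := by
          apply List.ext_getElem
          · simp [pvES]
          · intro i h1 h2
            have hio : i < pvOrder.length := by
              simp only [pvES, List.length_zipWith] at h1; omega
            simp only [pvES, List.getElem_zipWith]
            have hne : pvOrder[i] ≠ p.1 := by
              intro hcon; exact hmem (hcon ▸ List.getElem_mem _)
            have hbb : (pvOrder[i] == p.1) = false := by simpa using hne
            simp [pvSlotFun, List.lookup, hbb]
        have hEX : pvEX (p :: cs) = pvPart p.1 p.2 :: pvEX cs := by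
          simp [pvEX, hv, hr]
        rw [hES, hEX]
        simp
      | some j =>
        obtain ⟨n, hj, hOn⟩ := pvRank_get_some hr
        obtain ⟨hn8, hOne⟩ := List.getElem?_eq_some_iff.mp hOn
        have hstep : pvStepB (s, e) p =
            (s.set n (some (pvPart p.1 p.2)), e) := by
          simp [pvStepB, hv, hr, hj]
        rw [hstep, ih hnd _ e (by simpa using hs)]
        have hES : pvES (p :: cs) s = pvES cs (s.set n (some (pvPart p.1 p.2))) := by
          apply List.ext_getElem
          · simp [pvES]
          · intro i h1 h2
            have hio : i < pvOrder.length := by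
              simp only [pvES, List.length_zipWith] at h1; omega
            simp only [pvES, List.getElem_zipWith]
            by_cases hin : i = n
            · subst hin
              have hsl : i < s.length := by rw [hs]; simpa using hn8
              simp [pvSlotFun, List.lookup, hOne, hlk, hv,
                List.getElem_set_self, hsl]
            · have hne : pvOrder[i] ≠ p.1 := by
                intro hcon
                exact hin (pvOrder_nodup.getElem_inj_iff.mp (by rw [hcon, hOne]))
              have hbb : (pvOrder[i] == p.1) = false := by simpa using hne
              simp [pvSlotFun, List.lookup, hbb, List.getElem_set_ne (Ne.symm hin)]
        have hEX : pvEX (p :: cs) = pvEX cs := by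
          simp [pvEX, hv, hr]
        rw [hES, hEX]
    · have hstep : pvStepB (s, e) p = (s, e) := by
        simp [pvStepB, hv]
      rw [hstep, ih hnd s e hs]
      have hES : pvES (p :: cs) s = pvES cs s := by
        apply List.ext_getElem
        · simp [pvES]
        · intro i h1 h2
          have hio : i < pvOrder.length := by
            simp only [pvES, List.length_zipWith] at h1; omega
          simp only [pvES, List.getElem_zipWith]
          by_cases hb : pvOrder[i] = p.1
          · simp [pvSlotFun, List.lookup, hb, hv, hlk]
          · have hbb : (pvOrder[i] == p.1) = false := by simpa using hb
            simp [pvSlotFun, List.lookup, hbb]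
      have hEX : pvEX (p :: cs) = pvEX cs := by
        simp [pvEX, hv]
      rw [hES, hEX]

-- a foldl appending `match g f` equals filterMap
lemma pvFoldOpt (g : String → Option String) :
    ∀ (O : List String) (acc : List String),
      O.foldl (fun ps f => match g f with | some x => ps ++ [x] | none => ps) acc
        = acc ++ O.filterMap g := by
  intro O
  induction O with
  | nil => intro acc; simp
  | cons f O ih =>
    intro acc
    cases h : g f <;> simp [List.foldl, h, ih]

lemma pvLookup_eq_get? (cs : List (String × Int)) (k : String) :
    cs.lookup k = (PySem.Dict.mk cs).get? k := by
  induction cs with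
  | nil => rfl
  | cons p cs ih =>
    rw [show (p :: cs) = ((p.1, p.2) :: cs) by rfl, PySem.Dict.get?_mk_cons]
    simp only [List.lookup]
    by_cases h : k = p.1
    · subst h; simp
    · have h1 : (k == p.1) = false := by simpa using h
      have h2 : (p.1 == k) = false := by simpa using fun hh => h hh.symm
      simp [h1, h2, ih]

lemma pvRank_isNone (k : String) : (pvRank.get? k).isNone = !pvOrder.contains k := by
  cases hr : pvRank.get? k with
  | none =>
    have := pvRank_get_none hr
    simp [List.contains_iff_mem, this]
  | some j =>
    obtain ⟨n, _, hOn⟩ := pvRank_get_some hr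
    obtain ⟨hn8, hOne⟩ := List.getElem?_eq_some_iff.mp hOn
    have : k ∈ pvOrder := hOne ▸ List.getElem_mem _
    simp [List.contains_iff_mem, this]

-- ===== VERDICT (by name: the statement is the Claim_ definition above) =====
theorem describe_pharmacophores_spec : Claim_equal_describe_pharmacophores := by
  unfold Claim_equal_describe_pharmacophores
  intro counts _ hpre
  unfold Spec_describe_pharmacophores describe_pharmacophores describe_pharmacophores_alt
  by_cases hc : counts.isEmpty
  · simp [hc]
  · simp only [hc, if_false, Bool.false_eq_true]
    rw [pvLoopB counts hpre (List.replicate 8 none) [] (by simp)]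
    -- A's first loop is the filterMap of the per-family option
    have hg : (fun (ps : List String) fam =>
        if (PySem.Dict.mk counts).contains fam then
          match (PySem.Dict.mk counts).get? fam with
          | some v => if 0 < v then ps ++ [pvPart fam v] else ps
          | none => ps
        else ps)
        = (fun ps f => match pvSlotFun counts f none with
                       | some x => ps ++ [x] | none => ps) := by
      funext ps f
      have hl : counts.lookup f = (PySem.Dict.mk counts).get? f := pvLookup_eq_get? counts f
      cases h : (PySem.Dict.mk counts).get? f with
      | none =>
        have hcf : (PySem.Dict.mk counts).contains f = false := by
          rw [PySem.Dict.contains_eq_isSome_get?, h]; rfl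
        simp [hcf, pvSlotFun, hl, h]
      | some v =>
        have hcf : (PySem.Dict.mk counts).contains f = true := by
          rw [PySem.Dict.contains_eq_isSome_get?, h]; rfl
        simp only [hcf, if_true, pvSlotFun, hl, h]
        by_cases hv : 0 < v <;> simp [hv]
    rw [hg, pvFoldOpt (fun f => pvSlotFun counts f none) pvOrder []]
    -- B's slot array filtered is the same filterMap
    have hslots : (pvES counts (List.replicate 8 none)).filterMap id
        = pvOrder.filterMap (fun f => pvSlotFun counts f none) := by
      have hmap : pvES counts (List.replicate 8 none)
          = pvOrder.map (fun f => pvSlotFun counts f none) := by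
        simp [pvES, pvOrder, List.replicate]
      rw [hmap, List.filterMap_map]
      rfl
    rw [hslots]
    -- A's second loop is a filter-map over the items
    rw [PySem.List.foldl_append_if
      (fun fv : String × Int => !pvOrder.contains fv.1 && decide (0 < fv.2))
      (fun fv => pvPart fv.1 fv.2)]
    have hEX2 : (counts.filter
          (fun fv => !pvOrder.contains fv.1 && decide (0 < fv.2))).map
          (fun fv => pvPart fv.1 fv.2) = pvEX counts := by
      unfold pvEX
      congr 1
      apply List.filter_congr
      intro fv _
      rw [pvRank_isNone, Bool.and_comm]
    rw [hEX2]
    simp
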